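-- pv_equiv track=rewrite | github.com/cybernuki/holbertonschool-interview | 0x00-lockboxes/0-lockboxes.py | openBox
-- ===== SOURCE A (Python) =====
-- def openBox(keys, boxes, hasOpen):
--     if not keys:
--         return {}
--     for key in keys:
--         if key >= 0 and key < len(boxes) and not hasOpen.get(key):
--             hasOpen.update({key: 1})
--             hasOpen.update(openBox(boxes[key], boxes, hasOpen))
--     return hasOpen
-- ===== SOURCE B (Python) =====
-- def openBox(keys, boxes, hasOpen):
--     # Two-stage: first compute the discovery ORDER of newly openable keys with an
--     # explicit-stack traversal over a plain visited set, then write the 1-marks into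
--     # hasOpen in that order (same in-place mutation and same returned dict as A).
--     if not keys:
--         return {}
--     opened = {k for k in hasOpen if hasOpen.get(k)}
--     order = []
--     stack = list(reversed(keys))
--     while stack:
--         k = stack.pop()
--         if 0 <= k < len(boxes) and k not in opened:
--             opened.add(k)
--             order.append(k)
--             stack.extend(reversed(boxes[k]))
--     for k in order:
--         hasOpen[k] = 1
--     return hasOpen
-- ===== Notes on version B (the rewrite author's own statement) =====
-- stated objective: alternative
-- what changed: A's recursive DFS that mutates the dict as it recurses is replaced by a two-stage algorithm: an explicit-stack traversal over a plain visited set computes the discovery order of newly openable keys, and only then the 1-marks are written into the dict in that order.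
import Mathlib
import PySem

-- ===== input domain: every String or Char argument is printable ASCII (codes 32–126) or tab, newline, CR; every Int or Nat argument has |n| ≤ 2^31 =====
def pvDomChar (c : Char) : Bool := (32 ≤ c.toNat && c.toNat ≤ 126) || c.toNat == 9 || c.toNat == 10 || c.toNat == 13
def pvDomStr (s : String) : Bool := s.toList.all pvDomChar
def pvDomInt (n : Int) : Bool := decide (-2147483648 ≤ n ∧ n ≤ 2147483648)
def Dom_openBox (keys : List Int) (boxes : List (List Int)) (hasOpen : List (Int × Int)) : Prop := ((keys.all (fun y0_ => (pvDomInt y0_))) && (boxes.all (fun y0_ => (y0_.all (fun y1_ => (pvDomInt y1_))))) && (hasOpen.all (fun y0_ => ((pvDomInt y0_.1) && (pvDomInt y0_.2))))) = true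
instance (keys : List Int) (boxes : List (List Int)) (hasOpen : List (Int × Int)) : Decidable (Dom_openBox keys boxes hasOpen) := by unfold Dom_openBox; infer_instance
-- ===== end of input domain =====

-- B replaces A's recursive dict-mutating DFS by a two-stage algorithm (explicit-stack traversal
-- over a plain visited set computing the discovery order, then writing the 1-marks in that order);
-- both Pythons mutate hasOpen in place the same way, the theorems are about the returned value.

-- `not hasOpen.get(key)`: true when the key is absent or its value is falsy (0)
def pvFresh (d : PySem.Dict Int Int) (k : Int) : Bool :=
  match d.get? k with
  | none => true
  | some v => v == 0

-- the guard `key >= 0 and key < len(boxes) and not hasOpen.get(key)`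
def pvValid (boxes : List (List Int)) (d : PySem.Dict Int Int) (k : Int) : Bool :=
  decide (0 ≤ k) && decide (k < (boxes.length : Int)) && pvFresh d k

-- ===== PORT A =====
-- Literal port of A's recursion. Python's recursion terminates because each recursive call
-- happens only after a fresh in-range key is set to 1; the fuel (decremented exactly at those
-- points, initialised to len(boxes) ≥ the number of openable keys) is only a totality guard:
-- the 0-branch is proved unreachable.  `hasOpen.update(openBox(...))` updates the shared dict
-- with itself (or {}), so the mutation is modelled by threading the dict through the call.
def openBoxGoA (boxes : List (List Int)) : Nat → List Int → PySem.Dict Int Int → PySem.Dict Int Int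
  | _, [], d => d
  | fuel, k :: ks, d =>
    if pvValid boxes d k then
      match fuel with
      | 0 => d
      | f + 1 => openBoxGoA boxes f ks (openBoxGoA boxes f ((PySem.List.pyGet? boxes k).getD []) (d.insert k 1))
    else openBoxGoA boxes fuel ks d
termination_by fuel keys _ => (fuel, keys.length)

def openBox (keys : List Int) (boxes : List (List Int)) (hasOpen : List (Int × Int)) : List (Int × Int) :=
  match keys with
  | [] => []  -- `if not keys: return {}`
  | _ => (openBoxGoA boxes boxes.length keys (PySem.Dict.mk hasOpen)).items

-- ===== PORT B =====
-- `opened = {k for k in hasOpen if hasOpen.get(k)}`: the keys already holding a truthy value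
def pvOpened0 (hasOpen : List (Int × Int)) : PySem.Set Int :=
  PySem.Set.ofList ((PySem.Dict.mk hasOpen).keys.filter
    (fun k => (PySem.Dict.mk hasOpen).getD k 0 != 0))

-- B's stack loop: it only reads the visited set `opened` and appends to `order`; the Lean list's
-- head is the stack's top (Python pops from the end of `list(reversed(keys))` and extends with
-- `reversed(boxes[key])`, i.e. prepends here).  The fuel — one unit per key opened, at most
-- len(boxes) ≥ the number of openable keys — is only a totality guard; 0-branch unreachable.
def pvCollect (boxes : List (List Int)) : Nat → List Int → PySem.Set Int → List Int → List Int
  | _, [], _, order => order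
  | fuel, k :: stack, opened, order =>
    if decide (0 ≤ k) && decide (k < (boxes.length : Int)) && !(PySem.Set.contains opened k) then
      match fuel with
      | 0 => order
      | f + 1 => pvCollect boxes f (((PySem.List.pyGet? boxes k).getD []) ++ stack)
                   (PySem.Set.add opened k) (order ++ [k])
    else pvCollect boxes fuel stack opened order
termination_by fuel stack _ _ => (fuel, stack.length)

def openBox_alt (keys : List Int) (boxes : List (List Int)) (hasOpen : List (Int × Int)) : List (Int × Int) :=
  if keys.isEmpty then []  -- `if not keys: return {}`
  else
    -- `for k in order: hasOpen[k] = 1` then `return hasOpen`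
    ((pvCollect boxes boxes.length keys (pvOpened0 hasOpen) []).foldl
      (fun d k => d.insert k 1) (PySem.Dict.mk hasOpen)).items

-- ===== PRECONDITION & SPEC =====
def Spec_openBox (keys : List Int) (boxes : List (List Int)) (hasOpen : List (Int × Int)) (out : List (Int × Int)) : Prop := out = openBox_alt keys boxes hasOpen
instance (keys : List Int) (boxes : List (List Int)) (hasOpen : List (Int × Int)) (out : List (Int × Int)) : Decidable (Spec_openBox keys boxes hasOpen out) := by unfold Spec_openBox; infer_instance

-- ===== CLAIM (what is proved, stated in full; the proofs are below) =====
def Claim_equal_openBox : Prop := ∀ (keys : List Int) (boxes : List (List Int)) (hasOpen : List (Int × Int)), Dom_openBox keys boxes hasOpen → Spec_openBox keys boxes hasOpen (openBox keys boxes hasOpen)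

-- ===== LEMMAS AND PROOFS =====

-- proof-only intermediate: the stack loop run directly on the dict (A's state, B's control)
def openBoxGoB (boxes : List (List Int)) : Nat → List Int → PySem.Dict Int Int → PySem.Dict Int Int
  | _, [], d => d
  | fuel, k :: stack, d =>
    if pvValid boxes d k then
      match fuel with
      | 0 => d
      | f + 1 => openBoxGoB boxes f (((PySem.List.pyGet? boxes k).getD []) ++ stack) (d.insert k 1)
    else openBoxGoB boxes fuel stack d
termination_by fuel stack _ => (fuel, stack.length)

-- number of still-openable (in-range, falsy-marked) box indices; used as fuel bound
def pvFreshCount (boxes : List (List Int)) (d : PySem.Dict Int Int) : Nat :=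
  (List.range boxes.length).countP (fun i => pvFresh d (Int.ofNat i))

theorem pvFresh_insert_one (d : PySem.Dict Int Int) (k j : Int) :
    pvFresh (d.insert k 1) j = if j = k then false else pvFresh d j := by
  unfold pvFresh
  rw [PySem.Dict.get?_insert]
  split_ifs <;> simp

theorem countP_lt_of_flip {α : Type} (l : List α) (p q : α → Bool)
    (hpq : ∀ x, p x = true → q x = true) (a : α) (ha : a ∈ l)
    (hpa : p a = false) (hqa : q a = true) : l.countP p < l.countP q := by
  induction l with
  | nil => cases ha
  | cons b l ih =>
    rw [List.countP_cons, List.countP_cons]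
    rcases List.mem_cons.1 ha with rfl | hb
    · simp only [hpa, hqa, if_true]
      have := List.countP_mono_left (l := l) (p := p) (q := q) (fun x _ h => hpq x h)
      simp only [Bool.false_eq_true, if_false]
      omega
    · have := ih hb
      have hb2 : (if q b = true then 1 else 0) ≥ (if p b = true then 1 else 0) := by
        by_cases hp : p b = true
        · rw [hp, hpq b hp]
        · simp [hp]
      omega

theorem pvFreshCount_insert_lt (boxes : List (List Int)) (d : PySem.Dict Int Int) (k : Int)
    (hv : pvValid boxes d k = true) :
    pvFreshCount boxes (d.insert k 1) < pvFreshCount boxes d := by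
  unfold pvValid at hv
  simp only [Bool.and_eq_true, decide_eq_true_eq] at hv
  obtain ⟨⟨h0, hlt⟩, hf⟩ := hv
  unfold pvFreshCount
  apply countP_lt_of_flip _ _ _ ?_ k.toNat ?_ ?_ ?_
  · intro x hx
    rw [pvFresh_insert_one] at hx
    split_ifs at hx
    exact hx
  · rw [List.mem_range]
    omega
  · rw [pvFresh_insert_one]
    have : Int.ofNat k.toNat = k := by simpa using Int.toNat_of_nonneg h0
    rw [this]
    simp
  · have : Int.ofNat k.toNat = k := by simpa using Int.toNat_of_nonneg h0
    rw [this]; exact hf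

theorem one_le_pvFreshCount (boxes : List (List Int)) (d : PySem.Dict Int Int) (k : Int)
    (hv : pvValid boxes d k = true) : 1 ≤ pvFreshCount boxes d := by
  unfold pvValid at hv
  simp only [Bool.and_eq_true, decide_eq_true_eq] at hv
  obtain ⟨⟨h0, hlt⟩, hf⟩ := hv
  unfold pvFreshCount
  have hk : k.toNat ∈ List.range boxes.length := by rw [List.mem_range]; omega
  have : Int.ofNat k.toNat = k := by simpa using Int.toNat_of_nonneg h0
  have hp : (fun i => pvFresh d (Int.ofNat i)) k.toNat = true := by simp only; rw [this]; exact hf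
  rw [Nat.one_le_iff_ne_zero]
  intro h
  rw [List.countP_eq_zero] at h
  exact absurd hp (by simpa using h k.toNat hk)

theorem pvFreshCount_insert_le (boxes : List (List Int)) (d : PySem.Dict Int Int) (k : Int) :
    pvFreshCount boxes (d.insert k 1) ≤ pvFreshCount boxes d := by
  unfold pvFreshCount
  apply List.countP_mono_left
  intro x _ hx
  rw [pvFresh_insert_one] at hx
  split_ifs at hx
  exact hx

-- equation lemmas for the well-founded loops
theorem goA_nil (boxes : List (List Int)) (f : Nat) (d : PySem.Dict Int Int) :
    openBoxGoA boxes f [] d = d := by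
  simp [openBoxGoA]

theorem goA_cons_valid (boxes : List (List Int)) (f : Nat) (k : Int) (ks : List Int)
    (d : PySem.Dict Int Int) (hv : pvValid boxes d k = true) :
    openBoxGoA boxes (f + 1) (k :: ks) d =
      openBoxGoA boxes f ks (openBoxGoA boxes f ((PySem.List.pyGet? boxes k).getD []) (d.insert k 1)) := by
  rw [openBoxGoA.eq_def]
  simp [hv]

theorem goA_cons_invalid (boxes : List (List Int)) (f : Nat) (k : Int) (ks : List Int)
    (d : PySem.Dict Int Int) (hv : ¬ pvValid boxes d k = true) :
    openBoxGoA boxes f (k :: ks) d = openBoxGoA boxes f ks d := by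
  rw [openBoxGoA.eq_def]
  simp [hv]

theorem goB_nil (boxes : List (List Int)) (f : Nat) (d : PySem.Dict Int Int) :
    openBoxGoB boxes f [] d = d := by
  simp [openBoxGoB]

theorem goB_cons_valid (boxes : List (List Int)) (f : Nat) (k : Int) (ks : List Int)
    (d : PySem.Dict Int Int) (hv : pvValid boxes d k = true) :
    openBoxGoB boxes (f + 1) (k :: ks) d =
      openBoxGoB boxes f (((PySem.List.pyGet? boxes k).getD []) ++ ks) (d.insert k 1) := by
  rw [openBoxGoB.eq_def]
  simp [hv]

theorem goB_cons_invalid (boxes : List (List Int)) (f : Nat) (k : Int) (ks : List Int)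
    (d : PySem.Dict Int Int) (hv : ¬ pvValid boxes d k = true) :
    openBoxGoB boxes f (k :: ks) d = openBoxGoB boxes f ks d := by
  rw [openBoxGoB.eq_def]
  simp [hv]

theorem pvFreshCount_goA_le (boxes : List (List Int)) (fuel : Nat) (keys : List Int)
    (d : PySem.Dict Int Int) :
    pvFreshCount boxes (openBoxGoA boxes fuel keys d) ≤ pvFreshCount boxes d := by
  fun_induction openBoxGoA boxes fuel keys d with
  | case1 => exact Nat.le_refl _
  | case2 => exact Nat.le_refl _
  | case3 k ks d hv f ih1 ih2 =>
    exact le_trans ih2 (le_trans ih1 (pvFreshCount_insert_le boxes d k))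
  | case4 fuel k ks d hv ih => exact ih

-- spending one surplus unit of fuel does not change goB's result
theorem goB_fuel_succ (boxes : List (List Int)) (f : Nat) :
    ∀ stack d, pvFreshCount boxes d ≤ f →
      openBoxGoB boxes (f + 1) stack d = openBoxGoB boxes f stack d := by
  induction f using Nat.strong_induction_on with
  | _ f ihf =>
    intro stack
    induction stack with
    | nil => intro d _; rw [goB_nil, goB_nil]
    | cons k ks ihs =>
      intro d hd
      by_cases hv : pvValid boxes d k = true
      · have h1 := one_le_pvFreshCount boxes d k hv
        obtain ⟨g, rfl⟩ : ∃ g, f = g + 1 := ⟨f - 1, by omega⟩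
        rw [goB_cons_valid boxes (g + 1) k ks d hv, goB_cons_valid boxes g k ks d hv]
        have hins : pvFreshCount boxes (d.insert k 1) ≤ g := by
          have := pvFreshCount_insert_lt boxes d k hv
          omega
        exact ihf g (by omega) _ _ hins
      · rw [goB_cons_invalid boxes (f + 1) k ks d hv, goB_cons_invalid boxes f k ks d hv]
        exact ihs d hd

-- the stack DFS run on `keys ++ rest` equals first running A's recursion on `keys`
theorem goA_goB_bridge (boxes : List (List Int)) (f : Nat) :
    ∀ keys rest d, pvFreshCount boxes d ≤ f →
      openBoxGoB boxes f (keys ++ rest) d = openBoxGoB boxes f rest (openBoxGoA boxes f keys d) := by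
  induction f using Nat.strong_induction_on with
  | _ f ihf =>
    intro keys
    induction keys with
    | nil => intro rest d _; rw [List.nil_append, goA_nil]
    | cons k ks ihs =>
      intro rest d hd
      by_cases hv : pvValid boxes d k = true
      · have h1 := one_le_pvFreshCount boxes d k hv
        obtain ⟨g, rfl⟩ : ∃ g, f = g + 1 := ⟨f - 1, by omega⟩
        have hins : pvFreshCount boxes (d.insert k 1) ≤ g := by
          have := pvFreshCount_insert_lt boxes d k hv
          omega
        rw [List.cons_append, goB_cons_valid boxes g k (ks ++ rest) d hv,
            goA_cons_valid boxes g k ks d hv]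
        rw [ihf g (by omega) _ (ks ++ rest) _ hins]
        have hd' : pvFreshCount boxes
            (openBoxGoA boxes g ((PySem.List.pyGet? boxes k).getD []) (d.insert k 1)) ≤ g :=
          le_trans (pvFreshCount_goA_le _ _ _ _) hins
        rw [ihf g (by omega) ks rest _ hd']
        rw [goB_fuel_succ boxes g rest _ (le_trans (pvFreshCount_goA_le _ _ _ _) hd')]
      · rw [List.cons_append, goB_cons_invalid boxes f k (ks ++ rest) d hv,
            goA_cons_invalid boxes f k ks d hv]
        exact ihs rest d hd

theorem pvFreshCount_le_length (boxes : List (List Int)) (d : PySem.Dict Int Int) :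
    pvFreshCount boxes d ≤ boxes.length := by
  unfold pvFreshCount
  calc (List.range boxes.length).countP (fun i => pvFresh d (Int.ofNat i))
      ≤ (List.range boxes.length).length := List.countP_le_length
    _ = boxes.length := List.length_range

-- `opened` mirrors the dict: a key is in the set iff it is not fresh in the dict
def pvMirror (d : PySem.Dict Int Int) (opened : PySem.Set Int) : Prop :=
  ∀ j : Int, PySem.Set.contains opened j = !(pvFresh d j)

theorem contains_add (s : PySem.Set Int) (k j : Int) :
    PySem.Set.contains (PySem.Set.add s k) j = (PySem.Set.contains s j || j == k) := by
  by_cases hj : j ∈ PySem.Set.add s k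
  · rw [(PySem.Set.contains_iff _ _).2 hj]
    rcases (PySem.Set.mem_add s k j).1 hj with h | h
    · rw [(PySem.Set.contains_iff _ _).2 h]; simp
    · simp [h]
  · have hs : j ∉ s := fun h => hj ((PySem.Set.mem_add s k j).2 (Or.inl h))
    have hk : ¬ j = k := fun h => hj ((PySem.Set.mem_add s k j).2 (Or.inr h))
    have c1 : PySem.Set.contains (PySem.Set.add s k) j = false := by
      rw [← Bool.not_eq_true]; intro h; exact hj ((PySem.Set.contains_iff _ _).1 h)
    have c2 : PySem.Set.contains s j = false := by
      rw [← Bool.not_eq_true]; intro h; exact hs ((PySem.Set.contains_iff _ _).1 h)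
    rw [c1, c2]
    simp [hk]

theorem pvMirror_insert (d : PySem.Dict Int Int) (opened : PySem.Set Int) (k : Int)
    (h : pvMirror d opened) : pvMirror (d.insert k 1) (PySem.Set.add opened k) := by
  intro j
  rw [contains_add, h j, pvFresh_insert_one]
  by_cases hj : j = k <;> simp [hj]

-- under pvMirror the two guards coincide
theorem guard_eq (boxes : List (List Int)) (d : PySem.Dict Int Int) (opened : PySem.Set Int)
    (h : pvMirror d opened) (k : Int) :
    (decide (0 ≤ k) && decide (k < (boxes.length : Int)) && !(PySem.Set.contains opened k)) =
      pvValid boxes d k := by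
  unfold pvValid
  rw [h k, Bool.not_not]

-- equation lemmas for pvCollect
theorem collect_nil (boxes : List (List Int)) (f : Nat) (op : PySem.Set Int) (ord : List Int) :
    pvCollect boxes f [] op ord = ord := by
  rw [pvCollect.eq_def]

theorem collect_cons_valid (boxes : List (List Int)) (f : Nat) (k : Int) (st : List Int)
    (op : PySem.Set Int) (ord : List Int)
    (hg : (decide (0 ≤ k) && decide (k < (boxes.length : Int)) && !(PySem.Set.contains op k)) = true) :
    pvCollect boxes (f + 1) (k :: st) op ord =
      pvCollect boxes f (((PySem.List.pyGet? boxes k).getD []) ++ st) (PySem.Set.add op k) (ord ++ [k]) := by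
  rw [pvCollect.eq_def]
  simp only [hg, if_true]

theorem collect_cons_valid_zero (boxes : List (List Int)) (k : Int) (st : List Int)
    (op : PySem.Set Int) (ord : List Int)
    (hg : (decide (0 ≤ k) && decide (k < (boxes.length : Int)) && !(PySem.Set.contains op k)) = true) :
    pvCollect boxes 0 (k :: st) op ord = ord := by
  rw [pvCollect.eq_def]
  simp only [hg, if_true]

theorem collect_cons_invalid (boxes : List (List Int)) (f : Nat) (k : Int) (st : List Int)
    (op : PySem.Set Int) (ord : List Int)
    (hg : ¬ (decide (0 ≤ k) && decide (k < (boxes.length : Int)) && !(PySem.Set.contains op k)) = true) :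
    pvCollect boxes f (k :: st) op ord = pvCollect boxes f st op ord := by
  rw [pvCollect.eq_def]
  simp only [hg, Bool.false_eq_true, if_false]

-- pvCollect's order parameter is a pure accumulator
theorem pvCollect_acc (boxes : List (List Int)) (fuel : Nat) :
    ∀ stack opened order, pvCollect boxes fuel stack opened order =
      order ++ pvCollect boxes fuel stack opened [] := by
  induction fuel using Nat.strong_induction_on with
  | _ f ihf =>
    intro stack
    induction stack with
    | nil => intro op ord; rw [collect_nil, collect_nil]; simp
    | cons k ks ihs =>
      intro op ord
      by_cases hg : (decide (0 ≤ k) && decide (k < (boxes.length : Int)) &&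
          !(PySem.Set.contains op k)) = true
      · match f with
        | 0 => rw [collect_cons_valid_zero boxes k ks op ord hg,
                   collect_cons_valid_zero boxes k ks op [] hg]; simp
        | g + 1 =>
          rw [collect_cons_valid boxes g k ks op ord hg,
              collect_cons_valid boxes g k ks op [] hg]
          rw [ihf g (by omega) _ _ (ord ++ [k]), ihf g (by omega) _ _ ([] ++ [k])]
          simp
      · rw [collect_cons_invalid boxes f k ks op ord hg,
            collect_cons_invalid boxes f k ks op [] hg]
        exact ihs op ord

-- the dict-level stack loop equals collecting the order first and folding the inserts after
theorem goB_eq_collect_fold (boxes : List (List Int)) (fuel : Nat) :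
    ∀ stack d opened, pvMirror d opened →
      openBoxGoB boxes fuel stack d =
        (pvCollect boxes fuel stack opened []).foldl (fun d k => d.insert k 1) d := by
  induction fuel using Nat.strong_induction_on with
  | _ f ihf =>
    intro stack
    induction stack with
    | nil => intro d opened _; rw [goB_nil, collect_nil]; rfl
    | cons k ks ihs =>
      intro d opened hm
      by_cases hv : pvValid boxes d k = true
      · have hg := (guard_eq boxes d opened hm k).trans hv
        match f with
        | 0 =>
          rw [collect_cons_valid_zero boxes k ks opened [] hg, openBoxGoB.eq_def]
          simp [hv]
        | g + 1 =>
          rw [goB_cons_valid boxes g k ks d hv,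
              collect_cons_valid boxes g k ks opened [] hg,
              pvCollect_acc boxes g]
          simp only [List.nil_append, List.singleton_append, List.foldl_cons]
          exact ihf g (by omega) _ _ _ (pvMirror_insert d opened k hm)
      · have hg : ¬ (decide (0 ≤ k) && decide (k < (boxes.length : Int)) &&
            !(PySem.Set.contains opened k)) = true := by
          rw [guard_eq boxes d opened hm k]; exact hv
        rw [goB_cons_invalid boxes f k ks d hv,
            collect_cons_invalid boxes f k ks opened [] hg]
        exact ihs d opened hm

-- the initial visited set mirrors the initial dict
theorem pvMirror_init (hasOpen : List (Int × Int)) :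
    pvMirror (PySem.Dict.mk hasOpen) (pvOpened0 hasOpen) := by
  intro j
  unfold pvOpened0 pvFresh
  by_cases hmem : j ∈ (PySem.Dict.mk hasOpen).keys
  · have hsome : ∃ v, (PySem.Dict.mk hasOpen).get? j = some v := by
      rcases h : (PySem.Dict.mk hasOpen).get? j with _ | v
      · exact absurd hmem ((PySem.Dict.get?_eq_none_iff_not_mem_keys _ _).1 h)
      · exact ⟨v, rfl⟩
    obtain ⟨v, hv⟩ := hsome
    have hgd : (PySem.Dict.mk hasOpen).getD j 0 = v := by
      rw [PySem.Dict.getD_eq_get?_getD, hv]; rfl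
    rw [hv]
    by_cases hz : v = 0
    · subst hz
      have : PySem.Set.contains (PySem.Set.ofList ((PySem.Dict.mk hasOpen).keys.filter
          (fun k => (PySem.Dict.mk hasOpen).getD k 0 != 0))) j = false := by
        rw [← Bool.not_eq_true]
        intro h
        have := (PySem.Set.mem_ofList _ _).1 ((PySem.Set.contains_iff _ _).1 h)
        have := List.of_mem_filter this
        rw [hgd] at this
        simp at this
      rw [this]; simp
    · have hin : j ∈ PySem.Set.ofList ((PySem.Dict.mk hasOpen).keys.filter
          (fun k => (PySem.Dict.mk hasOpen).getD k 0 != 0)) := by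
        rw [PySem.Set.mem_ofList _ _]
        exact List.mem_filter.2 ⟨hmem, by rw [hgd]; simpa using hz⟩
      rw [(PySem.Set.contains_iff _ _).2 hin]
      simp [hz]
  · have hnone : (PySem.Dict.mk hasOpen).get? j = none :=
      (PySem.Dict.get?_eq_none_iff_not_mem_keys _ _).2 hmem
    have : PySem.Set.contains (PySem.Set.ofList ((PySem.Dict.mk hasOpen).keys.filter
        (fun k => (PySem.Dict.mk hasOpen).getD k 0 != 0))) j = false := by
      rw [← Bool.not_eq_true]
      intro h
      exact hmem (List.mem_of_mem_filter
        ((PySem.Set.mem_ofList _ _).1 ((PySem.Set.contains_iff _ _).1 h)))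
    rw [hnone, this]
    simp

-- ===== VERDICT (by name: the statement is the Claim_ definition above) =====
theorem openBox_spec : Claim_equal_openBox := by
  unfold Claim_equal_openBox
  intro keys boxes hasOpen _
  unfold Spec_openBox
  match keys with
  | [] => rfl
  | k :: ks =>
    show (openBoxGoA boxes boxes.length (k :: ks) (PySem.Dict.mk hasOpen)).items = _
    unfold openBox_alt
    simp only [List.isEmpty_cons, Bool.false_eq_true, if_false]
    have h := goA_goB_bridge boxes boxes.length (k :: ks) [] (PySem.Dict.mk hasOpen)
      (pvFreshCount_le_length boxes (PySem.Dict.mk hasOpen))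
    rw [List.append_nil] at h
    rw [← goB_eq_collect_fold boxes boxes.length (k :: ks) (PySem.Dict.mk hasOpen)
      (pvOpened0 hasOpen) (pvMirror_init hasOpen), h, goB_nil]
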